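-- pv_equiv track=rewrite | github.com/Nbobertz/lcproblems_solutions | restofLeetcode/DSA_Prep/Monotomic_stack/MakeArrayNonDecreasing.py | maximumPossibleSize
-- ===== SOURCE A (Python) =====
-- from typing import List
--
-- def maximumPossibleSize(nums: List[int]) -> int:
--     # ok so this is a monotomic stack problem since we are going to use a stack and it is goin to be strictly increasing in size as we go across. The question however is will we double up.
--
--     # capture edge case
--     if not nums:
--         return 0
--
--     stack = []
--
--     for i, n in enumerate(nums):
--         if not stack:
--             # prime this bad boi
--             stack.append(n)
--         else:
--             # if number is larger go ahead and append
--             if n >= stack[-1]: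
--                 stack.append(n)  # larger goes on top
--
--             # what if the number is less though? We should be able to append the [-1] since it's the largest
--             elif n < stack[-1]:
--                 # just replace
--                 pass  # ? can we just pass
--
--     return len(stack)
-- ===== SOURCE B (Python) =====
-- from typing import List
--
-- def maximumPossibleSize(nums: List[int]) -> int:
--     # Stateless characterization: element i survives A's greedy stack iff it is
--     # >= every earlier element, i.e. >= max(nums[:i]); just count those indices.
--     return sum(1 for i, n in enumerate(nums) if i == 0 or n >= max(nums[:i]))
-- ===== Notes on version B (the rewrite author's own statement) =====
-- stated objective: alternative
-- what changed: Replaces the sequential monotonic-stack construction by a stateless counting formula: an element is counted iff it is >= max of its strict prefix, computed per index with max(nums[:i]); no stack or carried loop state, at the cost of quadratic prefix-max evaluation.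
import Mathlib
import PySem

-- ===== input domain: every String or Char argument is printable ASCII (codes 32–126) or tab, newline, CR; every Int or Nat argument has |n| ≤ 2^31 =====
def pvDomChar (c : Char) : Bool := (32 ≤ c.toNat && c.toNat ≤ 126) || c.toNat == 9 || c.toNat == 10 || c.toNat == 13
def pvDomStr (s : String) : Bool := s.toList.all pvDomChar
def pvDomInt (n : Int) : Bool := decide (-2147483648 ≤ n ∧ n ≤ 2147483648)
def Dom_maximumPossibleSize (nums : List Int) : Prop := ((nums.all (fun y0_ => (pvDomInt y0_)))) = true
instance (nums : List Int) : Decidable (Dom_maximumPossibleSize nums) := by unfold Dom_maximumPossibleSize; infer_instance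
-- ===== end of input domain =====

-- B replaces A's monotonic stack by a stateless counting formula: count the indices i with nums[i] >= max(nums[:i]); alternative decomposition, not faster.


-- ===== PORT A =====
def maximumPossibleSize (nums : List Int) : Int :=
  if nums = [] then 0
  else
    let stack := nums.foldl (fun stack n =>
      if stack = [] then stack ++ [n]
      else if n ≥ ((PySem.List.pyGet? stack (-1)).getD 0) then stack ++ [n]
      else if n < ((PySem.List.pyGet? stack (-1)).getD 0) then stack
      else stack) []
    (stack.length : Int)

-- ===== PORT B =====
def maximumPossibleSize_alt (nums : List Int) : Int :=
  ((PySem.List.enumerate nums 0).countP (fun (p : Int × Int) =>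
      p.1 == 0 ||
        (match PySem.List.max? (PySem.List.slice nums none (some p.1)) (fun y => y) with
         | none => false
         | some m => decide (m ≤ p.2))) : Int)

-- ===== PRECONDITION & SPEC =====
def Spec_maximumPossibleSize (nums : List Int) (out : Int) : Prop := out = maximumPossibleSize_alt nums
instance (nums : List Int) (out : Int) : Decidable (Spec_maximumPossibleSize nums out) := by unfold Spec_maximumPossibleSize; infer_instance

-- ===== CLAIM (what is proved, stated in full; the proofs are below) =====
def Claim_equal_maximumPossibleSize : Prop := ∀ (nums : List Int), Dom_maximumPossibleSize nums → Spec_maximumPossibleSize nums (maximumPossibleSize nums)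

-- ===== LEMMAS AND PROOFS =====

-- common recursive reference: number of survivors of l given running maximum M
def pvC (M : Int) : List Int → Int
  | [] => 0
  | n :: t => (if M ≤ n then 1 else 0) + pvC (max M n) t

-- A's stack loop: final length = initial length + pvC (top of stack)
lemma pvA (l : List Int) : ∀ (ys : List Int) (x : Int),
    (((l.foldl (fun stack n =>
      if stack = [] then stack ++ [n]
      else if n ≥ ((PySem.List.pyGet? stack (-1)).getD 0) then stack ++ [n]
      else if n < ((PySem.List.pyGet? stack (-1)).getD 0) then stack
      else stack) (ys ++ [x])).length : Int))
    = (ys ++ [x]).length + pvC x l := by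
  induction l with
  | nil => intro ys x; simp [pvC]
  | cons n t ih =>
    intro ys x
    have hne : ys ++ [x] ≠ [] := by simp
    have hget : ((PySem.List.pyGet? (ys ++ [x]) (-1)).getD 0) = x := by
      rw [PySem.List.pyGet?_neg_one_append_singleton]; rfl
    simp only [List.foldl_cons, if_neg hne, hget]
    by_cases h : x ≤ n
    · rw [if_pos (by exact h)]
      have := ih (ys ++ [x]) n
      rw [List.append_assoc] at this ⊢
      rw [this]
      simp [pvC, h]
      omega
    · have hlt : n < x := lt_of_not_ge h
      rw [if_neg (by exact h), if_pos hlt]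
      rw [ih ys x]
      simp [pvC, h, max_eq_left (le_of_lt hlt)]

-- B's count over the tail: indices are positive, each prefix is (x :: rest) ++ (earlier tail)
lemma pvB (t : List Int) : ∀ (x : Int) (rest : List Int),
    ((List.countP (fun (p : Int × Int) =>
      p.1 == 0 ||
        (match PySem.List.max? (PySem.List.slice ((x :: rest) ++ t) none (some p.1)) (fun y => y) with
         | none => false
         | some m => decide (m ≤ p.2)))
      (PySem.List.enumerate t ((x :: rest).length : Int))) : Int)
    = pvC (rest.foldl max x) t := by
  induction t with
  | nil => intro x rest; simp [PySem.List.enumerate, pvC]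
  | cons n t ih =>
    intro x rest
    rw [PySem.List.enumerate_cons, List.countP_cons]
    have hs0 : (((x :: rest).length : Int) == 0) = false := by
      simp [List.length_cons]; omega
    have hslice : PySem.List.slice ((x :: rest) ++ n :: t) none (some ((x :: rest).length : Int))
        = x :: rest := by
      rw [PySem.List.slice_to_natCast, List.take_left]
    have hmax : PySem.List.max? (x :: rest) (fun y => y) = some (rest.foldl max x) :=
      PySem.List.max?_id_cons x rest
    simp only [hs0, hslice, hmax, Bool.false_or]
    have htail : ((x :: rest).length : Int) + 1 = ((x :: (rest ++ [n])).length : Int) := by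
      simp
    have hlist : (x :: rest) ++ n :: t = (x :: (rest ++ [n])) ++ t := by simp
    rw [htail, hlist]
    push_cast
    rw [ih x (rest ++ [n]), List.foldl_append]
    simp only [List.foldl_cons, List.foldl_nil, pvC]
    by_cases h : rest.foldl max x ≤ n
    · simp [h]
      omega
    · simp [h]

-- ===== VERDICT (by name: the statement is the Claim_ definition above) =====
theorem maximumPossibleSize_spec : Claim_equal_maximumPossibleSize := by
  intro nums _
  unfold Spec_maximumPossibleSize maximumPossibleSize maximumPossibleSize_alt
  rcases nums with _ | ⟨m, t⟩
  · simp [PySem.List.enumerate]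
  · simp only [if_neg (List.cons_ne_nil m t)]
    rw [PySem.List.enumerate_cons, List.countP_cons]
    have hA : (List.foldl (fun stack n =>
      if stack = [] then stack ++ [n]
      else if n ≥ ((PySem.List.pyGet? stack (-1)).getD 0) then stack ++ [n]
      else if n < ((PySem.List.pyGet? stack (-1)).getD 0) then stack
      else stack) [] (m :: t))
        = (List.foldl (fun stack n =>
      if stack = [] then stack ++ [n]
      else if n ≥ ((PySem.List.pyGet? stack (-1)).getD 0) then stack ++ [n]
      else if n < ((PySem.List.pyGet? stack (-1)).getD 0) then stack
      else stack) ([] ++ [m]) t) := by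
      simp
    rw [hA, pvA t [] m]
    have hB := pvB t m []
    norm_num at hB ⊢
    linarith [hB]
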